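-- pv_equiv track=rewrite | github.com/bamboosingsinwind/interview | interview_code/.history/python/huawei0510-1_20230524201738.py | st_combine
-- ===== SOURCE A (Python) =====
-- def check(st,i):
--     if len(st)==0:
--         return st,i
--     else:
--         su = sum(st)
--         for j in range(len(st)):
--             if i == su:#sum(st[j:]):
--                 st = st[:j]
--                 i = i*2
--                 break
--             su -= st[j]
--     return st,i
--
-- def st_combine(li):
--     st = []
--     for i in li:
--         st,n1 = check(st,i)
--         while n1!=i and len(st)>0:
--             i = n1
--             st,n1 = check(st,i)
--         st.append(n1)
--     return st
-- ===== SOURCE B (Python) =====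
-- # Same stack-collapse semantics as A, but the O(len(st)) inner scan is replaced by a
-- # hash lookup: we keep prefix sums of the stack and a dict mapping each prefix-sum
-- # value to its first index, so the longest matching suffix is found in O(1).
-- def st_combine(li):
--     st = []
--     pre = [0]          # pre[k] == sum(st[:k])
--     first = {0: 0}     # value -> smallest k with pre[k] == value
--     for x in li:
--         i = x
--         while True:
--             total = pre[-1]
--             j = first.get(total - i)
--             if j is None or j == len(st):
--                 break
--             # collapse the suffix st[j:]: pop prefix entries above j
--             while len(pre) - 1 > j:
--                 k = len(pre) - 1
--                 v = pre.pop()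
--                 if first.get(v) == k:
--                     del first[v]
--             del st[j:]
--             if i == 0:
--                 break      # A's loop condition n1 != i stops after one collapse
--             i *= 2
--         st.append(i)
--         t = pre[-1] + i
--         pre.append(t)
--         if t not in first:
--             first[t] = len(pre) - 1
--     return st
-- ===== Notes on version B (the rewrite author's own statement) =====
-- stated objective: faster
-- what changed: A rescans the whole stack with a running suffix sum on every push; B maintains the stack's prefix sums plus a dict mapping each prefix-sum value to its first index, so the longest suffix summing to the pushed value is found by one hash lookup and pops are amortised O(1).
import Mathlib
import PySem

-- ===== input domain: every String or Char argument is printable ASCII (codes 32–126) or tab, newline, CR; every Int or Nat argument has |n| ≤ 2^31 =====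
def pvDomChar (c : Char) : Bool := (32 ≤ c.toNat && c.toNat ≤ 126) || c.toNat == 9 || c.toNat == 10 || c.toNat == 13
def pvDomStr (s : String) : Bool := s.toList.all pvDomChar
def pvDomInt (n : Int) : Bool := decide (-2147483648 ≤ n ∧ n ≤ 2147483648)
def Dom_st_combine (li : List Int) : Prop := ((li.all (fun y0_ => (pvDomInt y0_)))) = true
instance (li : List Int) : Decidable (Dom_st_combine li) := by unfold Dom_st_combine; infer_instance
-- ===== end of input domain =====

-- B replaces A's O(len(st)) inner suffix-sum scan per push by a hash lookup over
-- maintained prefix sums (dict value -> first index), a different, faster algorithm.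


-- ===== PORT A =====
-- 'for j in range(len(st))' with running suffix sum su and break; walking the
-- suffix list realizes st[j] (always in range here).
def checkLoop (st : List Int) (i : Int) : Int → Nat → List Int → List Int × Int
  | _, _, [] => (st, i)
  | su, j, a :: rest =>
    if i = su then (st.take j, i * 2) else checkLoop st i (su - a) (j + 1) rest

def check (st : List Int) (i : Int) : List Int × Int :=
  if st.length = 0 then (st, i) else checkLoop st i st.sum 0 st

-- the 'while n1!=i and len(st)>0' loop; the fuel only makes it total (the stack
-- strictly shrinks on every continuing iteration, so st.length + 2 always suffices)
def whileLoop : Nat → List Int → Int → Int → List Int × Int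
  | 0, st, _, n1 => (st, n1)
  | fuel + 1, st, i, n1 =>
    if n1 ≠ i ∧ st.length ≠ 0 then
      let p := check st n1
      whileLoop fuel p.1 n1 p.2
    else (st, n1)

def combineStep (st : List Int) (i : Int) : List Int :=
  let p := check st i
  let q := whileLoop (st.length + 2) p.1 i p.2
  q.1 ++ [q.2]

def st_combine (li : List Int) : List Int := li.foldl combineStep []

-- ===== PORT B =====
-- 'while len(pre) - 1 > j: k = len(pre)-1; v = pre.pop(); if first.get(v)==k: del first[v]'
-- (fuel = pre.length makes it total)
def popLoop : Nat → List Int → PySem.Dict Int Int → Int → List Int × PySem.Dict Int Int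
  | 0, pre, first, _ => (pre, first)
  | fuel + 1, pre, first, j =>
    if (pre.length : Int) - 1 > j then
      let k : Int := (pre.length : Int) - 1
      let v := PySem.List.pyGetD pre (-1) 0
      let first' := if first.get? v = some k then first.erase v else first
      popLoop fuel pre.dropLast first' j
    else (pre, first)

-- the 'while True' collapse loop (fuel = st.length + 1 makes it total: each
-- continuing iteration truncates the stack strictly)
def collapseLoop : Nat → List Int → List Int → PySem.Dict Int Int → Int →
    List Int × List Int × PySem.Dict Int Int × Int
  | 0, st, pre, first, i => (st, pre, first, i)
  | fuel + 1, st, pre, first, i =>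
    let total := PySem.List.pyGetD pre (-1) 0
    match first.get? (total - i) with
    | none => (st, pre, first, i)
    | some j =>
      if j = (st.length : Int) then (st, pre, first, i)
      else
        let r := popLoop pre.length pre first j
        let st' := PySem.List.slice st none (some j)
        if i = 0 then (st', r.1, r.2, 0)
        else collapseLoop fuel st' r.1 r.2 (i * 2)

def altStep (s : List Int × List Int × PySem.Dict Int Int) (x : Int) :
    List Int × List Int × PySem.Dict Int Int :=
  let r := collapseLoop (s.1.length + 1) s.1 s.2.1 s.2.2 x
  let st2 := r.1 ++ [r.2.2.2]
  let t := PySem.List.pyGetD r.2.1 (-1) 0 + r.2.2.2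
  let pre2 := r.2.1 ++ [t]
  let first2 := if r.2.2.1.contains t then r.2.2.1 else r.2.2.1.insert t ((pre2.length : Int) - 1)
  (st2, pre2, first2)

def st_combine_alt (li : List Int) : List Int :=
  (li.foldl altStep ([], [0], PySem.Dict.empty.insert 0 0)).1

-- ===== PRECONDITION & SPEC =====
def Spec_st_combine (li : List Int) (out : List Int) : Prop := out = st_combine_alt li
instance (li : List Int) (out : List Int) : Decidable (Spec_st_combine li out) := by unfold Spec_st_combine; infer_instance

-- ===== CLAIM (what is proved, stated in full; the proofs are below) =====
def Claim_equal_st_combine : Prop := ∀ (li : List Int), Dom_st_combine li → Spec_st_combine li (st_combine li)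

-- ===== LEMMAS AND PROOFS =====

-- abstract description of one 'find the longest suffix summing to i' step
def findJFrom : List Int → Int → Nat → Option Nat
  | [], _, _ => none
  | a :: rest, i, j => if i = a + rest.sum then some j else findJFrom rest i (j + 1)

def findJ (st : List Int) (i : Int) : Option Nat := findJFrom st i 0

theorem findJFrom_none (rest : List Int) (i : Int) :
    ∀ j, (∀ m, m < rest.length → (rest.drop m).sum ≠ i) → findJFrom rest i j = none := by
  induction rest with
  | nil => intro j h; rfl
  | cons a rest ih =>
    intro j h
    have h0 := h 0 (by simp)
    simp at h0
    rw [findJFrom, if_neg (by omega)]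
    exact ih (j+1) (fun m hm => h (m+1) (by simpa using hm))

theorem findJFrom_some (rest : List Int) (i : Int) :
    ∀ j k, k < rest.length → (rest.drop k).sum = i →
      (∀ m, m < k → (rest.drop m).sum ≠ i) → findJFrom rest i j = some (j + k) := by
  induction rest with
  | nil => intro j k hk; simp at hk
  | cons a rest ih =>
    intro j k hk hsum hmin
    match k with
    | 0 =>
      simp at hsum
      rw [findJFrom, if_pos (by omega)]; rfl
    | k+1 =>
      have h0 := hmin 0 (by omega)
      simp at h0
      rw [findJFrom, if_neg (by omega)]
      have := ih (j+1) k (by simpa using hk) (by simpa using hsum)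
        (fun m hm => by simpa using hmin (m+1) (by omega))
      rw [this]; congr 1; omega

theorem findJFrom_spec (rest : List Int) (i : Int) :
    ∀ j k, findJFrom rest i j = some k →
      j ≤ k ∧ k - j < rest.length ∧ (rest.drop (k - j)).sum = i := by
  induction rest with
  | nil => intro j k h; simp [findJFrom] at h
  | cons a rest ih =>
    intro j k h
    rw [findJFrom] at h
    by_cases hc : i = a + rest.sum
    · rw [if_pos hc] at h
      injection h with h; subst h
      refine ⟨le_refl _, by simp, by simp; omega⟩
    · rw [if_neg hc] at h
      obtain ⟨h1, h2, h3⟩ := ih (j+1) k h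
      refine ⟨by omega, by simp; omega, ?_⟩
      have : k - j = (k - (j+1)) + 1 := by omega
      rw [this]
      simpa using h3

theorem findJ_lt {st : List Int} {i : Int} {j : Nat} (h : findJ st i = some j) :
    j < st.length := by
  have := findJFrom_spec st i 0 j h
  omega

-- the value A's per-element processing converges to
def aco (st : List Int) (i : Int) : List Int × Int :=
  match h : findJ st i with
  | none => (st, i)
  | some j => if i = 0 then (st.take j, 0) else aco (st.take j) (i * 2)
termination_by st.length
decreasing_by
  have := findJ_lt h
  simp [List.length_take]; omega

theorem checkLoop_eq (st : List Int) (i : Int) :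
    ∀ rest j, rest = st.drop j →
      checkLoop st i rest.sum j rest =
        (match findJFrom rest i j with
         | none => (st, i)
         | some k => (st.take k, i * 2)) := by
  intro rest
  induction rest with
  | nil => intro j _; rfl
  | cons a rest ih =>
    intro j hj
    rw [checkLoop, findJFrom]
    by_cases hc : i = a + rest.sum
    · rw [if_pos (by simpa using hc), if_pos hc]
    · rw [if_neg (by simpa using hc), if_neg hc]
      have hrest : rest = st.drop (j + 1) := by
        rw [← List.drop_drop]
        simp [← hj]
      have hsu : (a :: rest).sum - a = rest.sum := by simp
      rw [hsu]
      exact ih (j + 1) hrest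

theorem check_spec (st : List Int) (i : Int) :
    check st i =
      (match findJ st i with
       | none => (st, i)
       | some j => (st.take j, i * 2)) := by
  unfold check
  by_cases h : st.length = 0
  · rw [if_pos h]
    have : st = [] := List.length_eq_zero_iff.mp h
    subst this; rfl
  · rw [if_neg h]
    have := checkLoop_eq st i st 0 (by simp)
    simpa [findJ] using this

theorem aco_none {st : List Int} {i : Int} (h : findJ st i = none) : aco st i = (st, i) := by
  rw [aco, h]

theorem aco_some {st : List Int} {i : Int} {j : Nat} (h : findJ st i = some j) :
    aco st i = if i = 0 then (st.take j, 0) else aco (st.take j) (i * 2) := by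
  rw [aco, h]

theorem whileLoop_eq :
    ∀ fuel st i, st.length + 2 ≤ fuel →
      whileLoop fuel (check st i).1 i (check st i).2 = aco st i := by
  intro fuel
  induction fuel with
  | zero => intro st i h; omega
  | succ fuel ih =>
    intro st i h
    rw [check_spec]
    cases hf : findJ st i with
    | none =>
      simp only [aco_none hf]
      rw [whileLoop, if_neg (by simp)]
    | some j =>
      have hj := findJ_lt hf
      by_cases hi : i = 0
      · subst hi
        simp only [aco_some hf]
        rw [whileLoop, if_neg (by simp)]
        simp
      · simp only [aco_some hf, if_neg hi]
        have hne : i * 2 ≠ i := by omega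
        have hlen : (st.take j).length = j := by simp; omega
        by_cases hz : j = 0
        · subst hz
          rw [whileLoop, if_neg (by simp)]
          rw [aco_none (by rfl)]
        · rw [whileLoop, if_pos ⟨hne, by omega⟩]
          have := ih (st.take j) (i * 2) (by omega)
          simpa using this

theorem combineStep_eq (st : List Int) (i : Int) :
    combineStep st i = (aco st i).1 ++ [(aco st i).2] := by
  show (whileLoop (st.length + 2) (check st i).1 i (check st i).2).1 ++
      [(whileLoop (st.length + 2) (check st i).1 i (check st i).2).2] = _
  rw [whileLoop_eq (st.length + 2) st i (le_refl _)]

-- ---- B side ----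

-- first : value -> first index at which it occurs in pre
def FM (pre : List Int) (d : PySem.Dict Int Int) : Prop :=
  ∀ v : Int, d.get? v = Option.map Int.ofNat (PySem.List.index? pre v)

def prefixes (st : List Int) : List Int :=
  (List.range (st.length + 1)).map (fun k => (st.take k).sum)

theorem length_prefixes (st : List Int) : (prefixes st).length = st.length + 1 := by
  simp [prefixes]

theorem prefixes_ne_nil (st : List Int) : prefixes st ≠ [] := by
  have := length_prefixes st
  intro h; rw [h] at this; simp at this

theorem getElem_prefixes (st : List Int) (k : Nat) (h : k < st.length + 1) :
    (prefixes st)[k]'(by rw [length_prefixes]; omega) = (st.take k).sum := by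
  simp [prefixes]

theorem pyGetD_prefixes_neg_one (st : List Int) :
    PySem.List.pyGetD (prefixes st) (-1) 0 = st.sum := by
  rw [PySem.List.pyGetD_neg_one (prefixes st) 0 (prefixes_ne_nil st)]
  rw [List.getLast_eq_getElem]
  have h1 : (prefixes st).length - 1 = st.length := by rw [length_prefixes]; omega
  simp only [h1, getElem_prefixes st st.length (by omega)]
  simp

theorem take_prefixes (st : List Int) (j : Nat) (h : j ≤ st.length) :
    (prefixes st).take (j + 1) = prefixes (st.take j) := by
  unfold prefixes
  rw [← List.map_take, List.take_range]
  have h2 : (st.take j).length = j := by simp; omega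
  rw [h2]
  have h3 : min (j + 1) (st.length + 1) = j + 1 := by omega
  rw [h3]
  apply List.map_congr_left
  intro k hk
  rw [List.mem_range] at hk
  rw [List.take_take, Nat.min_eq_left (by omega)]

theorem prefixes_append_singleton (st : List Int) (x : Int) :
    prefixes (st ++ [x]) = prefixes st ++ [st.sum + x] := by
  unfold prefixes
  have h1 : (st ++ [x]).length + 1 = (st.length + 1) + 1 := by simp
  rw [h1, List.range_succ, List.map_append]
  congr 1
  · apply List.map_congr_left
    intro k hk
    rw [List.mem_range] at hk
    rw [List.take_append_of_le_length (by omega)]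
  · simp

theorem get?_erase_self (d : PySem.Dict Int Int) (k : Int) : (d.erase k).get? k = none := by
  obtain ⟨items⟩ := d
  simp only [PySem.Dict.erase, PySem.Dict.get?]
  induction items with
  | nil => rfl
  | cons p t ih =>
    by_cases hp : p.1 = k
    · simpa [List.filter_cons, hp] using ih
    · simpa [List.filter_cons, List.find?_cons, hp] using ih

theorem get?_erase_of_ne (d : PySem.Dict Int Int) (k k' : Int) (h : k' ≠ k) :
    (d.erase k).get? k' = d.get? k' := by
  obtain ⟨items⟩ := d
  simp only [PySem.Dict.erase, PySem.Dict.get?]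
  induction items with
  | nil => rfl
  | cons p t ih =>
    by_cases hp : p.1 = k
    · have hkk : ¬ (k = k') := fun hh => h hh.symm
      have hp' : ¬ (p.1 = k') := by rw [hp]; exact hkk
      simpa [List.filter_cons, List.find?_cons, hp, hp', hkk] using ih
    · by_cases hq : p.1 = k'
      · simp [List.filter_cons, List.find?_cons, hq, h]
      · simpa [List.filter_cons, List.find?_cons, hp, hq] using ih

theorem index?_lt_length {xs : List Int} {v : Int} {k : Nat}
    (h : PySem.List.index? xs v = some k) : k < xs.length := by
  obtain ⟨hk, _, _⟩ := PySem.List.getElem_of_index?_eq_some h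
  exact hk

theorem FM_pop (R : List Int) (v : Int) (d : PySem.Dict Int Int) (h : FM (R ++ [v]) d) :
    FM R (if d.get? v = some (R.length : Int) then d.erase v else d) := by
  by_cases hv : v ∈ R
  · have hidx : PySem.List.index? (R ++ [v]) v = PySem.List.index? R v :=
      PySem.List.index?_append_of_mem _ hv
    cases hm : PySem.List.index? R v with
    | none => exact absurd ((PySem.List.index?_eq_none_iff _ _).mp hm) (by simpa using hv)
    | some m =>
      have hmlt := index?_lt_length hm
      have hcond : d.get? v ≠ some (R.length : Int) := by
        rw [h v, hidx, hm]; simp; omega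
      rw [if_neg hcond]
      intro w
      rw [h w]
      congr 1
      by_cases hw : w ∈ R
      · rw [PySem.List.index?_append_of_mem _ hw]
      · have hwv : w ≠ v := fun e => hw (e ▸ hv)
        rw [(PySem.List.index?_eq_none_iff _ _).mpr hw,
          (PySem.List.index?_eq_none_iff _ _).mpr (by simp [hw, hwv])]
  · have hidx : PySem.List.index? (R ++ [v]) v = some R.length :=
      PySem.List.index?_append_singleton_self _ _ hv
    have hcond : d.get? v = some (R.length : Int) := by rw [h v, hidx]; rfl
    rw [if_pos hcond]
    intro w
    by_cases hw : w = v
    · subst hw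
      rw [get?_erase_self, (PySem.List.index?_eq_none_iff _ _).mpr hv]
      rfl
    · rw [get?_erase_of_ne _ _ _ hw, h w]
      congr 1
      by_cases hwR : w ∈ R
      · rw [PySem.List.index?_append_of_mem _ hwR]
      · rw [(PySem.List.index?_eq_none_iff _ _).mpr hwR,
          (PySem.List.index?_eq_none_iff _ _).mpr (by simp [hwR, hw])]

theorem FM_push (R : List Int) (t : Int) (d : PySem.Dict Int Int) (h : FM R d) :
    FM (R ++ [t]) (if d.contains t then d else d.insert t (R.length : Int)) := by
  by_cases ht : t ∈ R
  · have hc : d.contains t = true := by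
      rw [PySem.Dict.contains_eq_isSome_get?, h t]
      cases hm : PySem.List.index? R t with
      | none => exact absurd ((PySem.List.index?_eq_none_iff _ _).mp hm) (by simpa using ht)
      | some m => rfl
    rw [if_pos hc]
    intro w
    rw [h w]
    congr 1
    by_cases hw : w ∈ R
    · rw [PySem.List.index?_append_of_mem _ hw]
    · have hwt : w ≠ t := fun e => hw (e ▸ ht)
      rw [(PySem.List.index?_eq_none_iff _ _).mpr hw,
        (PySem.List.index?_eq_none_iff _ _).mpr (by simp [hw, hwt])]
  · have hc : d.contains t = false := by
      rw [PySem.Dict.contains_eq_isSome_get?, h t,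
        (PySem.List.index?_eq_none_iff _ _).mpr ht]
      rfl
    rw [if_neg (by simp [hc])]
    intro w
    by_cases hw : w = t
    · subst hw
      rw [PySem.Dict.get?_insert_self, PySem.List.index?_append_singleton_self _ _ ht]
      rfl
    · rw [PySem.Dict.get?_insert_of_ne _ _ hw, h w]
      congr 1
      by_cases hwR : w ∈ R
      · rw [PySem.List.index?_append_of_mem _ hwR]
      · rw [(PySem.List.index?_eq_none_iff _ _).mpr hwR,
          (PySem.List.index?_eq_none_iff _ _).mpr (by simp [hwR, hw])]

theorem popLoop_eq :
    ∀ (Q : List Int) (fuel : Nat) (P : List Int) (d : PySem.Dict Int Int),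
      Q.length ≤ fuel → FM (P ++ Q) d →
      (popLoop fuel (P ++ Q) d ((P.length : Int) - 1)).1 = P ∧
      FM P (popLoop fuel (P ++ Q) d ((P.length : Int) - 1)).2 := by
  intro Q
  induction Q using List.reverseRecOn with
  | nil =>
    intro fuel P d hf hFM
    cases fuel with
    | zero => exact ⟨by simp [popLoop], by simp only [popLoop]; simpa using hFM⟩
    | succ fuel =>
      rw [popLoop, if_neg (by simp)]
      exact ⟨by simp, by simpa using hFM⟩
  | append_singleton Q' v ih =>
    intro fuel P d hf hFM
    cases fuel with
    | zero => simp at hf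
    | succ fuel =>
      have hassoc : P ++ (Q' ++ [v]) = (P ++ Q') ++ [v] := by simp
      rw [popLoop, if_pos (by simp)]
      rw [hassoc, PySem.List.pyGetD_neg_one_append_singleton, List.dropLast_concat]
      rw [show (((P ++ Q' ++ [v]).length : Int) - 1) = ((P ++ Q').length : Int) by
        simp; omega]
      exact ih fuel P _ (by simp at hf ⊢; omega) (FM_pop (P ++ Q') v d (by rwa [hassoc] at hFM))

-- the dict lookup on prefix sums computes exactly findJ
theorem sum_drop_eq {st : List Int} {m : Nat} :
    (st.drop m).sum = st.sum - (st.take m).sum := by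
  have := List.sum_take_add_sum_drop st m
  omega

theorem mem_prefixes {st : List Int} {m : Nat} (h : m < st.length + 1) :
    (st.take m).sum ∈ prefixes st := by
  unfold prefixes
  exact List.mem_map.mpr ⟨m, List.mem_range.mpr h, rfl⟩

theorem lookup_none (st : List Int) (i : Int)
    (h : PySem.List.index? (prefixes st) (st.sum - i) = none) : findJ st i = none := by
  have hnm := (PySem.List.index?_eq_none_iff _ _).mp h
  apply findJFrom_none
  intro m hm hdrop
  apply hnm
  have : (st.take m).sum = st.sum - i := by
    have := sum_drop_eq (st := st) (m := m)
    omega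
  rw [← this]
  exact mem_prefixes (by omega)

theorem lookup_some_len (st : List Int) (i : Int)
    (h : PySem.List.index? (prefixes st) (st.sum - i) = some st.length) : findJ st i = none := by
  obtain ⟨hk, hval, hmin⟩ := PySem.List.getElem_of_index?_eq_some h
  apply findJFrom_none
  intro m hm hdrop
  have hne := hmin m (by omega)
  rw [getElem_prefixes st m (by omega)] at hne
  apply hne
  have := sum_drop_eq (st := st) (m := m)
  omega

theorem lookup_some_lt (st : List Int) (i : Int) (j : Nat) (hj : j < st.length)
    (h : PySem.List.index? (prefixes st) (st.sum - i) = some j) : findJ st i = some j := by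
  obtain ⟨hk, hval, hmin⟩ := PySem.List.getElem_of_index?_eq_some h
  rw [getElem_prefixes st j (by omega)] at hval
  have hdropj : (st.drop j).sum = i := by
    have := sum_drop_eq (st := st) (m := j)
    omega
  have := findJFrom_some st i 0 j hj hdropj (fun m hm => by
    have hne := hmin m (by omega)
    rw [getElem_prefixes st m (by omega)] at hne
    have := sum_drop_eq (st := st) (m := m)
    omega)
  simpa [findJ] using this

theorem collapseLoop_eq :
    ∀ fuel st (d : PySem.Dict Int Int) i, st.length < fuel → FM (prefixes st) d →
      (collapseLoop fuel st (prefixes st) d i).1 = (aco st i).1 ∧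
      (collapseLoop fuel st (prefixes st) d i).2.1 = prefixes (aco st i).1 ∧
      FM (prefixes (aco st i).1) (collapseLoop fuel st (prefixes st) d i).2.2.1 ∧
      (collapseLoop fuel st (prefixes st) d i).2.2.2 = (aco st i).2 := by
  intro fuel
  induction fuel with
  | zero => intro st d i h; omega
  | succ fuel ih =>
    intro st d i hlt hFM
    rw [collapseLoop, pyGetD_prefixes_neg_one, hFM (st.sum - i)]
    cases hx : PySem.List.index? (prefixes st) (st.sum - i) with
    | none =>
      rw [aco_none (lookup_none st i hx)]
      exact ⟨rfl, rfl, hFM, rfl⟩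
    | some jN =>
      simp only [Option.map_some, Int.ofNat_eq_natCast]
      have hjle : jN < st.length + 1 := by
        have := index?_lt_length hx; rwa [length_prefixes] at this
      by_cases hj : jN = st.length
      · rw [if_pos (by rw [hj])]
        rw [aco_none (lookup_some_len st i (hj ▸ hx))]
        exact ⟨rfl, rfl, hFM, rfl⟩
      · have hjlt : jN < st.length := by omega
        rw [if_neg (by simpa using hj)]
        have hPtake : (prefixes st).take (jN + 1) = prefixes (st.take jN) :=
          take_prefixes st jN (by omega)
        have hPQ : prefixes st = prefixes (st.take jN) ++ (prefixes st).drop (jN + 1) := by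
          rw [← hPtake]; exact (List.take_append_drop _ _).symm
        have hPlen : ((prefixes (st.take jN)).length : Int) - 1 = ((jN : Nat) : Int) := by
          rw [length_prefixes]; simp [List.length_take]; omega
        have hpop := popLoop_eq ((prefixes st).drop (jN + 1)) ((prefixes st).length)
          (prefixes (st.take jN)) d (by simp [length_prefixes]; omega) (by rw [← hPQ]; exact hFM)
        rw [hPlen] at hpop
        rw [← hPQ] at hpop
        obtain ⟨hp1, hp2⟩ := hpop
        rw [PySem.List.slice_to_natCast, aco_some (lookup_some_lt st i jN hjlt hx)]
        by_cases hi : i = 0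
        · rw [if_pos hi, if_pos hi]
          exact ⟨rfl, by rw [hp1], by rw [hp1]; exact hp2, rfl⟩
        · rw [if_neg hi, if_neg hi, hp1]
          exact ih (st.take jN) _ (i * 2) (by simp [List.length_take]; omega) hp2

theorem altStep_eq (st : List Int) (d : PySem.Dict Int Int) (x : Int)
    (h : FM (prefixes st) d) :
    ∃ d2, altStep (st, prefixes st, d) x =
        (combineStep st x, prefixes (combineStep st x), d2) ∧
      FM (prefixes (combineStep st x)) d2 := by
  obtain ⟨h1, h2, h3, h4⟩ := collapseLoop_eq (st.length + 1) st d x (by omega) h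
  simp only [altStep, h1, h2, h4]
  rw [pyGetD_prefixes_neg_one, ← prefixes_append_singleton, ← combineStep_eq]
  have hlen : (((prefixes (combineStep st x)).length : Int) - 1)
      = ((prefixes (aco st x).1).length : Int) := by
    rw [length_prefixes, length_prefixes, combineStep_eq]
    simp
  rw [hlen]
  have hpush := FM_push (prefixes (aco st x).1) ((aco st x).1.sum + (aco st x).2) _ h3
  rw [← prefixes_append_singleton, ← combineStep_eq] at hpush
  exact ⟨_, rfl, hpush⟩

theorem fold_eq :
    ∀ (li : List Int) (st : List Int) (d : PySem.Dict Int Int), FM (prefixes st) d →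
      li.foldl combineStep st = (li.foldl altStep (st, prefixes st, d)).1 := by
  intro li
  induction li with
  | nil => intro st d _; rfl
  | cons x li ih =>
    intro st d h
    rw [List.foldl_cons, List.foldl_cons]
    obtain ⟨d2, hstep, h2⟩ := altStep_eq st d x h
    rw [hstep]
    exact ih _ _ h2

theorem FM_init : FM (prefixes []) (PySem.Dict.empty.insert 0 0) := by
  have h0 : prefixes [] = [0] := by simp [prefixes]
  intro v
  by_cases hv : v = 0
  · subst hv
    rw [PySem.Dict.get?_insert_self, h0, PySem.List.index?_cons_self]
    rfl
  · rw [PySem.Dict.get?_insert_of_ne _ _ hv, PySem.Dict.get?_empty, h0,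
      PySem.List.index?_cons_of_ne _ (fun e => hv e.symm)]
    rfl

-- ===== VERDICT (by name: the statement is the Claim_ definition above) =====
theorem st_combine_spec : Claim_equal_st_combine := by
  intro li _
  unfold Spec_st_combine st_combine st_combine_alt
  have h0 : prefixes [] = [0] := by simp [prefixes]
  rw [← h0, fold_eq li [] _ FM_init]
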